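-- pv_equiv track=rewrite | github.com/wyk18703232953/myResearch | codeComplex/data/filteredData/python/constant/python_constant_0097.py | solve
-- ===== SOURCE A (Python) =====
-- def solve(a, b):
--     m = max(a, b)
--     n = min(a, b)
--     if n == 0:
--         return 0
--     if m == n:
--         return 1
--     elif m % n == 0:
--         return m // n
--     k = m // n
--     return k + solve(n, m - n * k)
-- ===== SOURCE B (Python) =====
-- def solve(a, b):
--     m, n = (a, b) if a >= b else (b, a)
--     if n == 0:
--         return 0
--     total = 0
--     while n:
--         total += m // n
--         m, n = n, m % n
--     return total
-- ===== Notes on version B (the rewrite author's own statement) =====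
-- stated objective: idiomatic
-- what changed: B normalizes the pair once and then runs the plain Euclidean algorithm in a two-line while loop summing every quotient m//n before stepping (m,n)->(n,m%n), instead of A's recursion that recomputes max/min each call and handles three separate base cases.
import Mathlib
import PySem

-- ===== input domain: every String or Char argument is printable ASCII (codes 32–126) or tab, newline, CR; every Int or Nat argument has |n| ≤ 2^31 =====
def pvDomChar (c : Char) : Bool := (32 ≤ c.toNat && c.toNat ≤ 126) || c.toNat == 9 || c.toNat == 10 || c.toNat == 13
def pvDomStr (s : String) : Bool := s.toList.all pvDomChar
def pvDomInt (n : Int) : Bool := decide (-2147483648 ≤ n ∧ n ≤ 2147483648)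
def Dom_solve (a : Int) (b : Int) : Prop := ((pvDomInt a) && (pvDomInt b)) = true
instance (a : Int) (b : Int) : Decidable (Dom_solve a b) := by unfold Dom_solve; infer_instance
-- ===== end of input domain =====

-- B normalizes the pair once and then sums all Euclidean quotients in a plain two-line loop
-- (idiomatic decomposition; same cost as A's three-base-case recursion).

-- ===== PORT A =====
-- Literal port of A's recursion; the `if h : 0 < min a b` guard only makes the
-- recursion total (on inputs failing it Python's recursion never returns; excluded by Pre_).
def solve (a : Int) (b : Int) : Int :=
  if min a b = 0 then 0
  else if max a b = min a b then 1
  else if PySem.Int.mod (max a b) (min a b) = 0 then PySem.Int.floordiv (max a b) (min a b)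
  else if h : 0 < min a b then
    PySem.Int.floordiv (max a b) (min a b) +
      solve (min a b) (max a b - min a b * PySem.Int.floordiv (max a b) (min a b))
  else 0
termination_by (min a b).toNat
decreasing_by
  have hn : 0 < min a b := h
  have hmod : PySem.Int.mod (max a b) (min a b) = (max a b) % (min a b) :=
    PySem.Int.mod_eq_emod_of_pos hn
  have hfd : PySem.Int.floordiv (max a b) (min a b) * (min a b) + PySem.Int.mod (max a b) (min a b) = max a b :=
    PySem.Int.floordiv_mul_add_mod _ _
  have hr0 : 0 ≤ (max a b) % (min a b) := Int.emod_nonneg _ (by omega)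
  have hrn : (max a b) % (min a b) < min a b := Int.emod_lt_of_pos _ hn
  have : max a b - min a b * PySem.Int.floordiv (max a b) (min a b) = (max a b) % (min a b) := by
    rw [← hmod]; linarith [hfd, mul_comm (PySem.Int.floordiv (max a b) (min a b)) (min a b)]
  rw [this]
  have : min (min a b) ((max a b) % (min a b)) = (max a b) % (min a b) := by omega
  rw [this]; omega

-- ===== PORT B =====
-- the `while n:` loop of Source B, carrying (total, m, n); terminates for every n since
-- Python's % shrinks |n| (sign of the divisor), so no extra guard is needed.
def solveGo (total : Int) (m : Int) (n : Int) : Int :=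
  if hn : n = 0 then total
  else solveGo (total + PySem.Int.floordiv m n) n (PySem.Int.mod m n)
termination_by n.natAbs
decreasing_by
  rcases lt_trichotomy n 0 with h | h | h
  · have := PySem.Int.mod_neg_bounds m h; omega
  · exact absurd h hn
  · have h1 := PySem.Int.mod_nonneg m h
    have h2 := PySem.Int.mod_lt m h
    omega

def solve_alt (a : Int) (b : Int) : Int :=
  let p : Int × Int := if a ≥ b then (a, b) else (b, a)
  if p.2 = 0 then 0 else solveGo 0 p.1 p.2

-- ===== PRECONDITION & SPEC =====
-- Pre_ excludes exactly the inputs on which the Python A recurses without bound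
-- (RecursionError): a negative min(a,b) that hits none of the first-call base cases.
def Pre_solve (a : Int) (b : Int) : Prop :=
  0 ≤ min a b ∨ max a b = min a b ∨ (min a b ≠ 0 ∧ PySem.Int.mod (max a b) (min a b) = 0)
instance (a : Int) (b : Int) : Decidable (Pre_solve a b) := by unfold Pre_solve; infer_instance
def pvWitness_solve : Int × Int := (21, 13)

def Spec_solve (a : Int) (b : Int) (out : Int) : Prop := out = solve_alt a b
instance (a : Int) (b : Int) (out : Int) : Decidable (Spec_solve a b out) := by unfold Spec_solve; infer_instance

-- ===== CLAIM (what is proved, stated in full; the proofs are below) =====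
def Claim_equal_solve : Prop := ∀ (a : Int) (b : Int), Dom_solve a b → Pre_solve a b → Spec_solve a b (solve a b)

-- ===== LEMMAS AND PROOFS =====

-- The B loop on an ordered positive state equals total plus A's recursive value.
theorem solveGo_eq_solve (N : Nat) :
    ∀ (m n total : Int), 0 < n → n ≤ m → n.toNat ≤ N →
      solveGo total m n = total + solve m n := by
  induction N with
  | zero => intro m n total hn _ hN; omega
  | succ N ih =>
    intro m n total hn hnm hN
    have hmin : min m n = n := by omega
    have hmax : max m n = m := by omega
    have hn0 : ¬ n = 0 := by omega
    have hmod : PySem.Int.mod m n = m % n := PySem.Int.mod_eq_emod_of_pos hn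
    have hfd : PySem.Int.floordiv m n * n + PySem.Int.mod m n = m :=
      PySem.Int.floordiv_mul_add_mod _ _
    have hr0 : 0 ≤ m % n := Int.emod_nonneg _ (by omega)
    have hrn : m % n < n := Int.emod_lt_of_pos _ hn
    rw [solve]
    simp only [hmin, hmax]
    rw [solveGo, dif_neg hn0]
    by_cases heq : m = n
    · subst heq
      have hm0 : PySem.Int.mod m m = 0 := by
        rw [PySem.Int.mod_eq_zero_iff_dvd]
      have hq : PySem.Int.floordiv m m = 1 := by
        have h1 : PySem.Int.floordiv m m * m = 1 * m := by
          rw [hm0] at hfd; linarith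
        exact mul_right_cancel₀ hn0 h1
      rw [hq, hm0, solveGo]
      simp [hn0]
    · by_cases hdvd : PySem.Int.mod m n = 0
      · rw [hdvd, solveGo]
        simp [hn0, heq]
      · have hrpos : 0 < PySem.Int.mod m n := by omega
        have hrlt : PySem.Int.mod m n < n := by omega
        have ih' := ih n (PySem.Int.mod m n) (total + PySem.Int.floordiv m n)
          hrpos (by omega) (by omega)
        rw [ih']
        have hr : PySem.Int.mod m n = m - n * PySem.Int.floordiv m n := by
          linarith [mul_comm (PySem.Int.floordiv m n) n]
        rw [if_neg hn0, if_neg heq, if_neg hdvd, dif_pos hn, hr]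
        ring

-- ===== VERDICT (by name: the statement is the Claim_ definition above) =====
theorem solve_spec : Claim_equal_solve := by
  intro a b _ hpre
  show solve a b = solve_alt a b
  have hp : (if a ≥ b then ((a, b) : Int × Int) else (b, a)) = (max a b, min a b) := by
    split <;> simp <;> omega
  have hB : solve_alt a b =
      (if (if a ≥ b then ((a, b) : Int × Int) else (b, a)).2 = 0 then 0
       else solveGo 0 (if a ≥ b then ((a, b) : Int × Int) else (b, a)).1
              (if a ≥ b then ((a, b) : Int × Int) else (b, a)).2) := rfl
  rw [hB, hp]
  rcases lt_trichotomy (min a b) 0 with hneg | hzero | hpos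
  · -- negative min: Pre_ forces one of the two immediate base cases of A
    have hne0 : ¬ min a b = 0 := by omega
    rw [if_neg hne0]
    have hfd := PySem.Int.floordiv_mul_add_mod (max a b) (min a b)
    have hself : PySem.Int.mod (min a b) (min a b) = 0 := by
      rw [PySem.Int.mod_eq_zero_iff_dvd]
    have hqself : PySem.Int.floordiv (min a b) (min a b) = 1 := by
      have hfd' := PySem.Int.floordiv_mul_add_mod (min a b) (min a b)
      rw [hself] at hfd'
      have h1 : PySem.Int.floordiv (min a b) (min a b) * min a b = 1 * min a b := by
        linarith
      exact mul_right_cancel₀ hne0 h1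
    by_cases heq : max a b = min a b
    · -- a = b < 0: both sides are 1
      rw [solve, if_neg hne0, if_pos heq, heq, solveGo, dif_neg hne0, hqself, hself,
        solveGo]
      simp
    · -- min a b divides max a b (the only remaining Pre_ case): both sides are the quotient
      have hm0 : PySem.Int.mod (max a b) (min a b) = 0 := by
        rcases hpre with h | h | ⟨h1, h2⟩
        · omega
        · exact absurd h heq
        · exact h2
      rw [solve, if_neg hne0, if_neg heq, if_pos hm0, solveGo, dif_neg hne0, hm0, solveGo]
      simp
  · rw [if_pos hzero, solve, if_pos hzero]
  · -- positive min: the loop invariant lemma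
    rw [if_neg (by omega), solveGo_eq_solve (min a b).toNat (max a b) (min a b) 0 hpos
      (by omega) le_rfl, zero_add]
    have h1 : min (max a b) (min a b) = min a b := by omega
    have h2 : max (max a b) (min a b) = max a b := by omega
    conv_lhs => rw [solve]
    conv_rhs => rw [solve]
    rw [h1, h2]
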